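-- pv_equiv track=rewrite | github.com/olsenw/LeetCodeExercises | Python3/maximize_score_after_n_operations.py | maxScore_incorrect
-- ===== SOURCE A (Python) =====
-- from math import gcd
-- from typing import List, Dict, Set, Optional
--
-- def maxScore_incorrect(nums: List[int]) -> int:
--     n = len(nums) // 2
--     g = [(i,j,gcd(nums[i],nums[j])) for i in range(len(nums)) for j in range(i+1,len(nums))]
--     answer = 0
--     while n > 0:
--         # issue is here
--         # what happens if there is a tie for gcd
--         # need to take the one that has worst follow up
--         # ie one that does note reduce the following step
--         a,b,c = max(g, key=lambda x: (x[2],-x[0],-x[1]))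
--         answer += n * c
--         pass
--         g = [i for i in g if i[0] != a and i[0] != b and i[1] != a and i[1] != b]
--         n -= 1
--     return answer
-- ===== SOURCE B (Python) =====
-- from math import gcd
--
-- def maxScore_incorrect(nums):
--     n = len(nums) // 2
--     L = len(nums)
--     pairs = sorted(((i, j, gcd(nums[i], nums[j])) for i in range(L) for j in range(i + 1, L)),
--                    key=lambda t: (t[2], -t[0], -t[1]), reverse=True)
--     used = set()
--     k = n
--     ans = 0
--     for i, j, c in pairs:
--         if k == 0:
--             break
--         if i not in used and j not in used:
--             ans += k * c
--             used.add(i)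
--             used.add(j)
--             k -= 1
--     return ans
-- ===== Notes on version B (the rewrite author's own statement) =====
-- stated objective: faster
-- what changed: Instead of re-scanning the whole pair list for the max and rebuilding it each of the n rounds, B sorts the pairs once by (gcd,-i,-j) descending and makes a single pass, taking the first pair whose endpoints are both unused (the key is injective, so each round's max over the surviving pairs is exactly the next unused pair in sorted order).
import Mathlib
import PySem

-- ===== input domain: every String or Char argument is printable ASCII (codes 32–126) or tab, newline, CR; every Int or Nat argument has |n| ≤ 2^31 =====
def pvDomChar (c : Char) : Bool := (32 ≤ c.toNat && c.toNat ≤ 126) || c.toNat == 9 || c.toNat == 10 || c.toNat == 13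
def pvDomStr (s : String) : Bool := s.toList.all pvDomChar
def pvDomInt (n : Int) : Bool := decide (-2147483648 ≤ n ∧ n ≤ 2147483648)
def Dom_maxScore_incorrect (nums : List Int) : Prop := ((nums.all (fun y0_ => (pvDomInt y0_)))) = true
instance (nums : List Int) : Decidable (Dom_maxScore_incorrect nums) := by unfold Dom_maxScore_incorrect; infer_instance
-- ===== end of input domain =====

-- B sorts the pair list once by the same key and takes pairs in one pass (faster, measured);
-- A repeatedly scans the whole pair list for its max and rebuilds it.

-- the Python key lambda (x[2], -x[0], -x[1]); Lex gives Python's lexicographic tuple order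
def pvKey (x : Int × Int × Int) : Lex (Int × Lex (Int × Int)) :=
  toLex (x.2.2, toLex (-x.1, -x.2.1))

-- the pair list [(i, j, gcd(nums[i], nums[j])) for i in range(len) for j in range(i+1, len)]
-- (indices produced by range are always in range, so pyGetD's default is never used)
def pvPairs (nums : List Int) : List (Int × Int × Int) :=
  (PySem.List.pyRange 0 (PySem.List.len nums) 1).flatMap (fun i =>
    (PySem.List.pyRange (i + 1) (PySem.List.len nums) 1).map (fun j =>
      (i, j, (Int.gcd (PySem.List.pyGetD nums i 0) (PySem.List.pyGetD nums j 0) : Int))))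

-- ===== PORT A =====
-- the while-loop: n counts down (fuel), g is rebuilt by filtering each round.
-- Python's max raises on an empty list; that state is unreachable (g always has a pair of
-- unused indices while n > 0), the 'none' branch merely totalises the match.
def pvLoopA : Nat → List (Int × Int × Int) → Int → Int
  | 0, _, answer => answer
  | Nat.succ m, g, answer =>
    match PySem.List.max? g pvKey with
    | none => answer
    | some (a, b, c) =>
      pvLoopA m (g.filter (fun x => x.1 ≠ a && x.1 ≠ b && x.2.1 ≠ a && x.2.1 ≠ b))
        (answer + (m + 1 : Nat) * c)

def maxScore_incorrect (nums : List Int) : Int :=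
  let n := PySem.Int.floordiv (PySem.List.len nums) 2
  pvLoopA n.toNat (pvPairs nums) 0

-- ===== PORT B =====
-- single pass over the sorted pair list, with the set of used indices and the countdown k
def pvScanB : List (Int × Int × Int) → Int → PySem.Set Int → Int → Int
  | [], _, _, ans => ans
  | (i, j, c) :: rest, k, used, ans =>
    if k = 0 then ans
    else if ¬ (i ∈ used) ∧ ¬ (j ∈ used) then
      pvScanB rest (k - 1) (PySem.Set.add (PySem.Set.add used i) j) (ans + k * c)
    else pvScanB rest k used ans

def maxScore_incorrect_alt (nums : List Int) : Int :=
  let n := PySem.Int.floordiv (PySem.List.len nums) 2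
  let pairs := PySem.List.sorted (pvPairs nums) pvKey true
  pvScanB pairs n PySem.Set.empty 0

-- ===== PRECONDITION & SPEC =====
def Spec_maxScore_incorrect (nums : List Int) (out : Int) : Prop := out = maxScore_incorrect_alt nums
instance (nums : List Int) (out : Int) : Decidable (Spec_maxScore_incorrect nums out) := by unfold Spec_maxScore_incorrect; infer_instance

-- ===== CLAIM (what is proved, stated in full; the proofs are below) =====
def Claim_equal_maxScore_incorrect : Prop := ∀ (nums : List Int), Dom_maxScore_incorrect nums → Spec_maxScore_incorrect nums (maxScore_incorrect nums)

-- ===== LEMMAS AND PROOFS =====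

theorem pv_max?_eq {l : List (Int × Int × Int)} {p : Int × Int × Int}
    (h1 : p ∈ l) (h2 : ∀ q ∈ l, q ≠ p → pvKey q < pvKey p) :
    PySem.List.max? l pvKey = some p := by
  cases hm : PySem.List.max? l pvKey with
  | none =>
    rw [PySem.List.max?_eq_none_iff] at hm
    subst hm; simp at h1
  | some m =>
    have hmem := PySem.List.max?_mem hm
    have hle := PySem.List.max?_isMax hm p h1
    by_cases hpm : m = p
    · rw [hpm]
    · exact absurd hle (not_le.mpr (h2 m hmem hpm))

-- elements of the pair list have pairwise distinct (i, j), hence distinct keys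
theorem pv_pairs_pairwise (nums : List Int) :
    (pvPairs nums).Pairwise (fun p q => pvKey p ≠ pvKey q) := by
  unfold pvPairs
  rw [List.pairwise_flatMap]
  constructor
  · intro i _
    rw [List.pairwise_map]
    refine (PySem.List.pairwise_lt_pyRange_one _ _).imp ?_
    intro j1 j2 hj
    simp only [pvKey, ne_eq, toLex_inj, Prod.mk.injEq, not_and]
    intros; omega
  · refine (PySem.List.pairwise_lt_pyRange_one _ _).imp ?_
    intro i1 i2 hi x hx y hy
    simp only [List.mem_map] at hx hy
    obtain ⟨j1, _, rfl⟩ := hx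
    obtain ⟨j2, _, rfl⟩ := hy
    simp only [pvKey, ne_eq, toLex_inj, Prod.mk.injEq, not_and]
    intros; omega

-- the sorted-descending pair list is strictly decreasing in key
theorem pv_sorted_strict (nums : List Int) :
    (PySem.List.sorted (pvPairs nums) pvKey true).Pairwise (fun a b => pvKey b < pvKey a) := by
  have h1 := PySem.List.sorted_pairwise_rev (pvPairs nums) pvKey
  have h2 : (PySem.List.sorted (pvPairs nums) pvKey true).Pairwise
      (fun p q => pvKey p ≠ pvKey q) :=
    (List.Perm.pairwise_iff (fun h => h.symm)
      (PySem.List.sorted_perm (pvPairs nums) pvKey true)).mpr (pv_pairs_pairwise nums)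
  exact (h1.and h2).imp (fun h => lt_of_le_of_ne h.1 h.2.symm)

def pvUnused (used : PySem.Set Int) (x : Int × Int × Int) : Bool :=
  !(PySem.Set.contains used x.1) && !(PySem.Set.contains used x.2.1)

-- core: A's iterated max-and-filter over any permutation of the surviving pairs
-- equals B's single scan of the strictly sorted list
theorem pv_loop_eq_scan (s : List (Int × Int × Int))
    (hs : s.Pairwise (fun a b => pvKey b < pvKey a)) :
    ∀ (k : Nat) (gA : List (Int × Int × Int)) (used : PySem.Set Int) (ans : Int),
      gA.Perm (s.filter (pvUnused used)) →
      pvLoopA k gA ans = pvScanB s (k : Int) used ans := by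
  induction s with
  | nil =>
    intro k gA used ans hperm
    have hg : gA = [] := List.Perm.eq_nil (by simpa using hperm)
    subst hg
    cases k <;> simp [pvLoopA, pvScanB, PySem.List.max?]
  | cons p rest ih =>
    obtain ⟨a, b, c⟩ := p
    have hhead : ∀ q ∈ rest, pvKey q < pvKey (a, b, c) := (List.pairwise_cons.mp hs).1
    have hrest := (List.pairwise_cons.mp hs).2
    intro k gA used ans hperm
    cases k with
    | zero => simp [pvLoopA, pvScanB]
    | succ m =>
      have hk0 : ¬ ((m + 1 : Nat) : Int) = 0 := by push_cast; omega
      by_cases hu : pvUnused used (a, b, c) = true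
      · -- (a,b,c) survives the filter: it is the unique maximum of gA
        rw [List.filter_cons_of_pos hu] at hperm
        have husedA : ¬ a ∈ used ∧ ¬ b ∈ used := by
          simpa [pvUnused] using hu
        have hmem : (a, b, c) ∈ gA := hperm.mem_iff.mpr (List.mem_cons_self)
        have hmax : PySem.List.max? gA pvKey = some (a, b, c) := by
          refine pv_max?_eq hmem ?_
          intro q hq hne
          have hq2 : q ∈ (a, b, c) :: rest.filter (pvUnused used) := hperm.subset hq
          rcases List.mem_cons.mp hq2 with h | h
          · exact absurd h hne
          · exact hhead q (List.mem_of_mem_filter h)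
        rw [show pvLoopA (m + 1) gA ans
              = pvLoopA m (gA.filter (fun x => x.1 ≠ a && x.1 ≠ b && x.2.1 ≠ a && x.2.1 ≠ b))
                  (ans + ((m + 1 : Nat) : Int) * c) by simp only [pvLoopA, hmax]]
        rw [show pvScanB ((a, b, c) :: rest) ((m + 1 : Nat) : Int) used ans
              = pvScanB rest (((m + 1 : Nat) : Int) - 1)
                  (PySem.Set.add (PySem.Set.add used a) b) (ans + ((m + 1 : Nat) : Int) * c) by
            rw [pvScanB.eq_def]; simp only [if_neg hk0, if_pos husedA]]
        have hcast : (((m + 1 : Nat) : Int) - 1) = ((m : Nat) : Int) := by push_cast; omega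
        rw [hcast]
        refine ih hrest m _ _ _ ?_
        have h1 := hperm.filter (fun x => x.1 ≠ a && x.1 ≠ b && x.2.1 ≠ a && x.2.1 ≠ b)
        rw [List.filter_cons_of_neg (by simp)] at h1
        rw [List.filter_filter] at h1
        refine h1.trans (List.Perm.of_eq (List.filter_congr ?_))
        intro x _
        rw [Bool.eq_iff_iff]
        simp only [pvUnused, Bool.and_eq_true, Bool.not_eq_eq_eq_not, Bool.not_true,
          decide_eq_true_eq, PySem.Set.contains_eq_listContains, List.contains_eq_mem, decide_eq_false_iff_not,
          PySem.Set.mem_add]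
        tauto
      · -- (a,b,c) is filtered out on both sides
        rw [List.filter_cons_of_neg hu] at hperm
        have husedA : ¬ (¬ a ∈ used ∧ ¬ b ∈ used) := by
          simpa [pvUnused, -Bool.not_eq_true] using hu
        rw [show pvScanB ((a, b, c) :: rest) ((m + 1 : Nat) : Int) used ans
              = pvScanB rest ((m + 1 : Nat) : Int) used ans by
            rw [pvScanB.eq_def]; simp only [if_neg hk0, if_neg husedA]]
        exact ih hrest (m + 1) gA used ans hperm

theorem maxScore_incorrect_spec : Claim_equal_maxScore_incorrect := by
  intro nums _
  show maxScore_incorrect nums = maxScore_incorrect_alt nums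
  unfold maxScore_incorrect maxScore_incorrect_alt
  have hn : 0 ≤ PySem.Int.floordiv (PySem.List.len nums) 2 := by
    rw [PySem.Int.floordiv_eq_ediv_of_pos (by omega)]
    exact Int.ediv_nonneg (by simp [PySem.List.len]) (by omega)
  rw [show PySem.Int.floordiv (PySem.List.len nums) 2
        = (((PySem.Int.floordiv (PySem.List.len nums) 2).toNat : Nat) : Int) from
      (Int.toNat_of_nonneg hn).symm]
  refine pv_loop_eq_scan _ (pv_sorted_strict nums) _ (pvPairs nums) PySem.Set.empty 0 ?_
  have : ∀ x ∈ PySem.List.sorted (pvPairs nums) pvKey true,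
      pvUnused PySem.Set.empty x = true := by
    intro x _; simp [pvUnused, PySem.Set.empty, PySem.Set.contains]
  rw [List.filter_eq_self.mpr this]
  exact (PySem.List.sorted_perm (pvPairs nums) pvKey true).symm
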